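-- pv_equiv track=rewrite | github.com/mayankgituni/Naive_Bayes_classifier | NaiveBayes.py | createFeatureFreqTable
-- ===== SOURCE A (Python) =====
-- def convertIntoFreqTable(dataSet):
--
--     freqTable = {}
--
--     for i in range(len(dataSet)):
--         if dataSet[i] not in freqTable:
--             freqTable[dataSet[i]] = []
--
--         freqTable[dataSet[i]].append(i)
--
--         # removing empty('?') values from the list
--         if '?' in freqTable.keys():
--             del freqTable['?']
--
--     return freqTable
--
-- def createFeatureFreqTable(dataSet):
--
--     features = []
--     featureData = []
--     featuresCount = len(dataSet[0])
--
--     for i in range(featuresCount):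
--         featureData.append([])
--
--     for line in dataSet:
--         for i in range(featuresCount):
--             featureData[i].append(line[i])
--
--     for i in range(featuresCount):
--         features.append(convertIntoFreqTable(featureData[i]))
--
--     return features
-- ===== SOURCE B (Python) =====
-- def createFeatureFreqTable(dataSet):
--     featuresCount = len(dataSet[0])
--     features = [{} for _ in range(featuresCount)]
--     for rowIdx, line in enumerate(dataSet):
--         for i in range(featuresCount):
--             value = line[i]
--             if value != '?':
--                 features[i].setdefault(value, []).append(rowIdx)
--     return features
-- ===== Notes on version B (the rewrite author's own statement) =====
-- stated objective: simpler
-- what changed: B drops A's transpose-then-helper decomposition (materializing per-column lists and running a per-column dict loop with repeated '?'-deletion) and instead builds all column tables in one row-major sweep with setdefault, skipping '?' up front.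
import Mathlib
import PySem

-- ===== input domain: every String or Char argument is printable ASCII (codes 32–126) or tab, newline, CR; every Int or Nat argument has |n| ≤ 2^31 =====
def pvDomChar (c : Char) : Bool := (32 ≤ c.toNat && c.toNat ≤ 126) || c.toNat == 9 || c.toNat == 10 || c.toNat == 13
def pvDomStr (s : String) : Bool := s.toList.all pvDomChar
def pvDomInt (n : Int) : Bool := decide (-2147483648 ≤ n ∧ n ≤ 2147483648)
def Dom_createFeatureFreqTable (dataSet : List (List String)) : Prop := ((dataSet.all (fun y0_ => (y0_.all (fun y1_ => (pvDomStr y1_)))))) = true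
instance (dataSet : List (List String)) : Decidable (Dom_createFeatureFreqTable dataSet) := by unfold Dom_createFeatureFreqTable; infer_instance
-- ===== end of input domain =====

-- B replaces A's transpose-then-per-column-helper decomposition by a single row-major
-- sweep that fills all column tables at once, skipping '?' values up front (objective: simpler).

-- ===== PORT A =====
-- helper convertIntoFreqTable: the Python dict becomes PySem.Dict
def convertIntoFreqTable (dataSet : List String) : PySem.Dict String (List Int) :=
  (PySem.List.pyRange 0 (dataSet.length : Int) 1).foldl
    (fun freqTable i =>
      let v := PySem.List.pyGetD dataSet i ""
      let freqTable := if freqTable.contains v then freqTable else freqTable.insert v []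
      let freqTable := freqTable.insert v (freqTable.getD v [] ++ [i])
      if freqTable.contains "?" then freqTable.erase "?" else freqTable)
    PySem.Dict.empty

def createFeatureFreqTable (dataSet : List (List String)) : List (List (String × List Int)) :=
  let featuresCount := (PySem.List.pyGetD dataSet 0 []).length
  let featureData : List (List String) :=
    (PySem.List.pyRange 0 (featuresCount : Int) 1).foldl (fun fd _ => fd ++ [[]]) []
  let featureData := dataSet.foldl
    (fun fd line =>
      (PySem.List.pyRange 0 (featuresCount : Int) 1).foldl
        (fun fd i =>
          PySem.List.pySetD fd i (PySem.List.pyGetD fd i [] ++ [PySem.List.pyGetD line i ""]))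
        fd)
    featureData
  (PySem.List.pyRange 0 (featuresCount : Int) 1).foldl
    (fun features i =>
      features ++ [(convertIntoFreqTable (PySem.List.pyGetD featureData i [])).items])
    []


-- ===== PORT B =====
def createFeatureFreqTable_alt (dataSet : List (List String)) : List (List (String × List Int)) :=
  let featuresCount := (PySem.List.pyGetD dataSet 0 []).length
  let features : List (PySem.Dict String (List Int)) :=
    (List.range featuresCount).map (fun _ => PySem.Dict.empty)
  let features := (PySem.List.enumerate dataSet).foldl
    (fun features p =>
      (PySem.List.pyRange 0 (featuresCount : Int) 1).foldl
        (fun features i =>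
          let value := PySem.List.pyGetD p.2 i ""
          if value = "?" then features
          else PySem.List.pySetD features i
            ((PySem.List.pyGetD features i PySem.Dict.empty).modify value [] (· ++ [p.1])))
        features)
    features
  features.map (·.items)

-- ===== PRECONDITION & SPEC =====
-- Pre_ excludes exactly the inputs where Python A raises IndexError: the empty dataSet
-- (dataSet[0]) and ragged inputs with a row shorter than the first row (line[i]).
def Pre_createFeatureFreqTable (dataSet : List (List String)) : Prop :=
  dataSet ≠ [] ∧ ∀ line ∈ dataSet, (PySem.List.pyGetD dataSet 0 []).length ≤ line.length
instance (dataSet : List (List String)) : Decidable (Pre_createFeatureFreqTable dataSet) := by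
  unfold Pre_createFeatureFreqTable; infer_instance
def pvWitness_createFeatureFreqTable : List (List String) := [["a", "?"], ["a", "b"]]

def Spec_createFeatureFreqTable (dataSet : List (List String)) (out : List (List (String × List Int))) : Prop := out = createFeatureFreqTable_alt dataSet
instance (dataSet : List (List String)) (out : List (List (String × List Int))) : Decidable (Spec_createFeatureFreqTable dataSet out) := by unfold Spec_createFeatureFreqTable; infer_instance

-- ===== CLAIM (what is proved, stated in full; the proofs are below) =====
def Claim_equal_createFeatureFreqTable : Prop := ∀ (dataSet : List (List String)), Dom_createFeatureFreqTable dataSet → Pre_createFeatureFreqTable dataSet → Spec_createFeatureFreqTable dataSet (createFeatureFreqTable dataSet)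

-- ===== LEMMAS AND PROOFS =====

-- A's per-element dict step and B's per-element dict step on (row-index, value) pairs
def aStep (d : PySem.Dict String (List Int)) (i : Int) (v : String) : PySem.Dict String (List Int) :=
  let d1 := if d.contains v then d else d.insert v []
  let d2 := d1.insert v (d1.getD v [] ++ [i])
  if d2.contains "?" then d2.erase "?" else d2

def bStep (d : PySem.Dict String (List Int)) (i : Int) (v : String) : PySem.Dict String (List Int) :=
  if v = "?" then d else d.insert v (d.getD v [] ++ [i])

def aRun (l : List (Int × String)) (d : PySem.Dict String (List Int)) : PySem.Dict String (List Int) :=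
  l.foldl (fun d p => aStep d p.1 p.2) d

def bRun (l : List (Int × String)) (d : PySem.Dict String (List Int)) : PySem.Dict String (List Int) :=
  l.foldl (fun d p => bStep d p.1 p.2) d

-- the (row-index, value) pairs of column k
def colOf (dataSet : List (List String)) (k : Nat) : List (Int × String) :=
  (PySem.List.enumerate dataSet 0).map (fun p => (p.1, PySem.List.pyGetD p.2 (k : Int) ""))


-- the three dict facts: A's insert-then-delete-'?' step equals B's skip-'?' step
theorem erase_insert_fresh (d : PySem.Dict String (List Int)) (x : List Int)
    (h : d.contains "?" = false) : (d.insert "?" x).erase "?" = d := by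
  apply PySem.Dict.ext
  have hi := PySem.Dict.items_insert_of_not_contains (d := d) (k := "?") (v := x)
  simp [PySem.Dict.erase, hi h, List.filter_append]
  intro p hp
  simp [PySem.Dict.contains, List.any_eq_false] at h
  exact (h p hp)

theorem bStep_no_q (d : PySem.Dict String (List Int)) (i : Int) (v : String)
    (h : d.contains "?" = false) : (bStep d i v).contains "?" = false := by
  unfold bStep
  split
  · exact h
  · rename_i hv
    rw [PySem.Dict.contains_insert]
    simp [h]
    exact fun e => hv e.symm

theorem step_eq (d : PySem.Dict String (List Int)) (i : Int) (v : String)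
    (h : d.contains "?" = false) : aStep d i v = bStep d i v := by
  unfold aStep bStep
  by_cases hv : v = "?"
  · subst hv
    simp only [h, Bool.false_eq_true, if_false]
    rw [PySem.Dict.getD_insert_self, PySem.Dict.insert_insert_self]
    simp only [List.nil_append]
    rw [if_pos (PySem.Dict.contains_insert_self _ _ _), erase_insert_fresh d _ h]
    simp
  · rw [if_neg hv]
    by_cases hc : d.contains v = true
    · simp only [hc, if_true]
      rw [if_neg]
      rw [PySem.Dict.contains_insert]
      simp [h]
      exact fun e => hv e.symm
    · replace hc : d.contains v = false := by simpa using hc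
      simp only [hc, Bool.false_eq_true, if_false]
      rw [PySem.Dict.getD_insert_self, PySem.Dict.insert_insert_self,
          PySem.Dict.getD_of_not_contains _ _ hc]
      simp only [List.nil_append]
      rw [if_neg]
      rw [PySem.Dict.contains_insert]
      simp [h]
      exact fun e => hv e.symm

theorem run_eq (l : List (Int × String)) (d : PySem.Dict String (List Int))
    (h : d.contains "?" = false) :
    l.foldl (fun d p => aStep d p.1 p.2) d = l.foldl (fun d p => bStep d p.1 p.2) d := by
  induction l generalizing d with
  | nil => rfl
  | cons p l ih =>
    simp only [List.foldl_cons]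
    rw [step_eq _ _ _ h]
    exact ih _ (bStep_no_q _ _ _ h)


-- fold over indices with getD = fold over enumerate
theorem foldl_range_getD_enum {α β : Type} (d0 : α) (f : β → Int → α → β) :
    ∀ (xs : List α) (s : Nat) (init : β),
      (List.range xs.length).foldl (fun acc (k : Nat) => f acc ((s : Int) + (k : Int)) (xs.getD k d0)) init
        = (PySem.List.enumerate xs (s : Int)).foldl (fun acc p => f acc p.1 p.2) init := by
  intro xs
  induction xs with
  | nil => intro s init; rfl
  | cons x xs ih =>
    intro s init
    rw [List.length_cons, List.range_succ_eq_map, PySem.List.enumerate_cons]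
    simp only [List.foldl_cons, List.foldl_map, Nat.cast_zero, add_zero, List.getD_cons_zero]
    have := ih (s + 1) (f init (s : Int) x)
    simp only [Nat.cast_add, Nat.cast_one] at this
    rw [← this]
    apply PySem.List.foldl_congr_mem
    intro acc k _
    simp only [Nat.succ_eq_add_one, List.getD_cons_succ]
    congr 1
    push_cast
    ring

-- generic "update each index once left to right" loop
theorem setEach {α : Type} (dflt : α) (g : Nat → α → α) (step : List α → Int → List α)
    (hstep : ∀ (fs : List α) (k : Nat), k < fs.length → step fs (k : Int) = fs.set k (g k (fs.getD k dflt))) :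
    ∀ (n : Nat) (fs : List α) (a : Nat), fs.length = a + n →
      (PySem.List.pyRange (a : Int) ((a + n : Nat) : Int) 1).foldl step fs
        = fs.take a ++ (fs.drop a).mapIdx (fun j x => g (a + j) x) := by
  intro n
  induction n with
  | zero =>
    intro fs a hlen
    rw [PySem.List.pyRange_one_eq_nil (by omega)]
    simp [List.drop_eq_nil_of_le (by omega : fs.length ≤ a), List.take_of_length_le (by omega : fs.length ≤ a)]
  | succ n ih =>
    intro fs a hlen
    have ha : a < fs.length := by omega
    rw [PySem.List.pyRange_one_cons (by exact_mod_cast by omega)]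
    rw [List.foldl_cons, hstep fs a ha]
    have h1 : ((a : Int) + 1) = ((a + 1 : Nat) : Int) := by push_cast; ring
    have h2 : ((a + (n+1) : Nat) : Int) = (((a+1) + n : Nat) : Int) := by push_cast; ring
    rw [h1, h2, ih (fs.set a (g a (fs.getD a dflt))) (a+1) (by simp; omega)]
    -- now massage take/drop of set
    have hget : fs.getD a dflt = fs[a] := List.getD_eq_getElem fs dflt ha
    rw [hget]
    rw [List.drop_set_of_lt (by omega : a < a + 1)]
    rw [show (fs.set a (g a fs[a])).take (a+1) = fs.take a ++ [g a fs[a]] by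
      rw [List.take_add_one, List.take_set_of_le (le_refl a), List.getElem?_set_self (by omega)]
      rfl]
    rw [show fs.drop a = fs[a] :: fs.drop (a+1) from (List.getElem_cons_drop ha).symm]
    rw [List.mapIdx_cons]
    simp only [List.append_assoc, List.singleton_append, add_zero]
    congr 1
    have hfun : (fun (j : Nat) (x : α) => g (a + 1 + j) x) = (fun (i : Nat) (x : α) => g (a + (i + 1)) x) := by
      funext j x; congr 1; omega
    rw [hfun]


theorem mapIdx_mapIdx' {α β γ : Type} (f : Nat → α → β) (g : Nat → β → γ) (l : List α) :
    (l.mapIdx f).mapIdx g = l.mapIdx (fun k x => g k (f k x)) := by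
  induction l generalizing f g with
  | nil => rfl
  | cons x xs ih => simp only [List.mapIdx_cons, ih]

theorem foldl_mapIdx_comm {α π : Type} (F : Nat → π → α → α) :
    ∀ (l : List π) (fs : List α),
      l.foldl (fun fs p => fs.mapIdx (fun k x => F k p x)) fs
        = fs.mapIdx (fun k x => l.foldl (fun x p => F k p x) x) := by
  intro l
  induction l with
  | nil =>
    intro fs
    induction fs with
    | nil => rfl
    | cons y ys ihy => simp only [List.foldl_nil, List.mapIdx_cons] at *; rw [← ihy]
  | cons p l ih =>
    intro fs
    simp only [List.foldl_cons, ih, mapIdx_mapIdx']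

theorem mapIdx_replicate {α β : Type} (f : Nat → α → β) (c : α) :
    ∀ (n : Nat), (List.replicate n c).mapIdx f = (List.range n).map (fun k => f k c) := by
  intro n
  induction n generalizing f with
  | zero => rfl
  | succ n ih =>
    rw [List.replicate_succ, List.mapIdx_cons, List.range_succ_eq_map]
    simp only [List.map_cons, List.map_map, ih]
    rfl

theorem enumerate_map {α β : Type} (f : α → β) :
    ∀ (xs : List α) (s : Int),
      PySem.List.enumerate (xs.map f) s = (PySem.List.enumerate xs s).map (fun p => (p.1, f p.2)) := by
  intro xs
  induction xs with
  | nil => intro s; rfl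
  | cons x xs ih =>
    intro s
    simp only [List.map_cons, PySem.List.enumerate_cons, ih, List.map_cons]

theorem foldl_of_invariant {σ π : Type} (P : σ → Prop) (f g : σ → π → σ)
    (hfg : ∀ s p, P s → f s p = g s p) (hP : ∀ s p, P s → P (g s p)) :
    ∀ (l : List π) (s : σ), P s → l.foldl f s = l.foldl g s := by
  intro l
  induction l with
  | nil => intro s _; rfl
  | cons p l ih =>
    intro s hs
    simp only [List.foldl_cons, hfg s p hs]
    exact ih _ (hP s p hs)

theorem setEach0 {α : Type} (dflt : α) (g : Nat → α → α) (step : List α → Int → List α)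
    (hstep : ∀ (fs : List α) (k : Nat), k < fs.length → step fs (k : Int) = fs.set k (g k (fs.getD k dflt)))
    (fs : List α) (m : Nat) (hm : fs.length = m) :
    (PySem.List.pyRange 0 (m : Int) 1).foldl step fs = fs.mapIdx g := by
  have h0 : ((0 : Nat) : Int) = (0 : Int) := by norm_num
  have := setEach dflt g step hstep m fs 0 (by omega)
  simp only [Nat.zero_add, h0] at this
  rw [this]
  simp

theorem getD_map_range' {β : Type} (f : Nat → β) (n k : Nat) (d : β) (hk : k < n) :
    ((List.range n).map f).getD k d = f k := by
  simp [List.getD, List.getElem?_map, List.getElem?_range, hk]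

theorem conv_char (col : List String) :
    convertIntoFreqTable col
      = (PySem.List.enumerate col 0).foldl (fun d p => aStep d p.1 p.2) PySem.Dict.empty := by
  show (PySem.List.pyRange 0 (col.length : Int) 1).foldl
      (fun d i => aStep d i (PySem.List.pyGetD col i "")) PySem.Dict.empty = _
  rw [PySem.List.pyRange_one, List.foldl_map]
  simp only [Int.sub_zero, Int.toNat_natCast]
  have := foldl_range_getD_enum "" (fun d i v => aStep d i v) col 0 PySem.Dict.empty
  simp only [Nat.cast_zero, zero_add] at this ⊢
  rw [← this]
  apply PySem.List.foldl_congr_mem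
  intro acc k _
  rw [PySem.List.pyGetD_natCast]

theorem A_char (dataSet : List (List String)) :
    createFeatureFreqTable dataSet
      = (List.range (PySem.List.pyGetD dataSet 0 []).length).map
          (fun k => (aRun (colOf dataSet k) PySem.Dict.empty).items) := by
  unfold createFeatureFreqTable
  set fc := (PySem.List.pyGetD dataSet 0 []).length with hfc
  simp only []
  -- step 1: initial featureData is replicate fc []
  have h0 : (PySem.List.pyRange 0 (fc : Int) 1).foldl (fun fd _ => fd ++ [[]]) ([] : List (List String))
      = List.replicate fc ([] : List String) := by
    rw [show (fun (fd : List (List String)) (_ : Int) => fd ++ [[]])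
          = (fun (acc : List (List String)) (x : Int) => acc ++ [(fun _ => []) x]) from rfl]
    rw [PySem.List.foldl_append_singleton_eq_map]
    simp [List.map_const, PySem.List.length_pyRange_one, List.eq_replicate_iff]
  rw [h0]
  -- step 2: each row pass is a mapIdx, by setEach0 under the length-fc invariant
  have hrow : dataSet.foldl
      (fun fd line =>
        (PySem.List.pyRange 0 (fc : Int) 1).foldl
          (fun fd i =>
            PySem.List.pySetD fd i (PySem.List.pyGetD fd i [] ++ [PySem.List.pyGetD line i ""]))
          fd)
      (List.replicate fc [])
      = dataSet.foldl
        (fun fd line => fd.mapIdx (fun k x => x ++ [PySem.List.pyGetD line (k : Int) ""]))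
        (List.replicate fc []) := by
    apply foldl_of_invariant (fun fd => fd.length = fc)
    · intro fs line hlen
      exact setEach0 [] (fun k x => x ++ [PySem.List.pyGetD line (k : Int) ""]) _
        (fun fs k hk => by
          rw [PySem.List.pySetD_natCast, PySem.List.pyGetD_natCast]) fs fc hlen
    · intro fs line hlen
      simpa using hlen
    · simp
  rw [hrow, foldl_mapIdx_comm (fun k line x => x ++ [PySem.List.pyGetD line (k : Int) ""]),
      mapIdx_replicate]
  -- step 3: the per-column fold of appends is a map
  have hcols : ∀ k : Nat,
      dataSet.foldl (fun x line => x ++ [PySem.List.pyGetD line (k : Int) ""]) []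
        = dataSet.map (fun line => PySem.List.pyGetD line (k : Int) "") := by
    intro k
    rw [show (fun (x : List String) (line : List String) => x ++ [PySem.List.pyGetD line (k : Int) ""])
        = (fun acc line => acc ++ [(fun line => PySem.List.pyGetD line (k : Int) "") line]) from rfl,
      PySem.List.foldl_append_singleton_eq_map]
    simp
  -- step 4: the output loop is a map
  rw [PySem.List.foldl_append_singleton_eq_map, PySem.List.pyRange_one, List.map_map]
  simp only [Int.sub_zero, Int.toNat_natCast, List.nil_append]
  apply List.map_congr_left
  intro k hk
  rw [List.mem_range] at hk
  simp only [Function.comp_apply, zero_add, PySem.List.pyGetD_natCast]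
  rw [getD_map_range' _ _ _ _ hk]
  have hcols' := hcols k
  simp only [PySem.List.pyGetD_natCast] at hcols'
  rw [hcols', conv_char, enumerate_map]
  simp [aRun, colOf, PySem.List.pyGetD_natCast]
theorem B_char (dataSet : List (List String)) :
    createFeatureFreqTable_alt dataSet
      = (List.range (PySem.List.pyGetD dataSet 0 []).length).map
          (fun k => (bRun (colOf dataSet k) PySem.Dict.empty).items) := by
  unfold createFeatureFreqTable_alt
  set fc := (PySem.List.pyGetD dataSet 0 []).length with hfc
  simp only []
  have h0 : (List.range fc).map (fun _ => (PySem.Dict.empty : PySem.Dict String (List Int)))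
      = List.replicate fc PySem.Dict.empty := by
    simp [List.eq_replicate_iff]
  rw [h0]
  have hrow : (PySem.List.enumerate dataSet).foldl
      (fun features p =>
        (PySem.List.pyRange 0 (fc : Int) 1).foldl
          (fun features i =>
            let value := PySem.List.pyGetD p.2 i ""
            if value = "?" then features
            else PySem.List.pySetD features i
              ((PySem.List.pyGetD features i PySem.Dict.empty).modify value [] (· ++ [p.1])))
          features)
      (List.replicate fc PySem.Dict.empty)
      = (PySem.List.enumerate dataSet).foldl
        (fun features p =>
          features.mapIdx (fun k d => bStep d p.1 (PySem.List.pyGetD p.2 (k : Int) "")))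
        (List.replicate fc PySem.Dict.empty) := by
    apply foldl_of_invariant (fun fs => fs.length = fc)
    · intro fs p hlen
      exact setEach0 PySem.Dict.empty
        (fun k d => bStep d p.1 (PySem.List.pyGetD p.2 (k : Int) "")) _
        (fun fs k hk => by
          simp only [PySem.List.pySetD_natCast, PySem.List.pyGetD_natCast, bStep,
            PySem.Dict.modify]
          split
          · rw [List.getD_eq_getElem _ _ hk, List.set_getElem_self]
          · rfl) fs fc hlen
    · intro fs p hlen
      simpa using hlen
    · simp
  rw [hrow]
  have h2 := foldl_mapIdx_comm
    (fun k (p : Int × List String) d => bStep d p.1 (PySem.List.pyGetD p.2 (k : Int) ""))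
    (PySem.List.enumerate dataSet 0) (List.replicate fc PySem.Dict.empty)
  rw [h2, mapIdx_replicate, List.map_map]
  apply List.map_congr_left
  intro k _
  simp only [Function.comp_apply]
  congr 1
  show _ = ((PySem.List.enumerate dataSet 0).map
      (fun q => (q.1, PySem.List.pyGetD q.2 (k : Int) ""))).foldl
      (fun d p => bStep d p.1 p.2) PySem.Dict.empty
  rw [List.foldl_map]

-- ===== VERDICT (by name: the statement is the Claim_ definition above) =====
theorem createFeatureFreqTable_spec : Claim_equal_createFeatureFreqTable := by
  intro dataSet _ _
  unfold Spec_createFeatureFreqTable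
  rw [A_char, B_char]
  apply List.map_congr_left
  intro k _
  rw [show aRun (colOf dataSet k) PySem.Dict.empty = bRun (colOf dataSet k) PySem.Dict.empty from
    run_eq _ _ (PySem.Dict.contains_empty _)]
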